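-- pv_equiv track=rewrite | github.com/Mgobeaalcoba/python_fundamentals | Programación 1 - Verano 2021/Ejercicio 2 TP 3.py | crearmatrize
-- ===== SOURCE A (Python) =====
-- def crearmatrize(filas,columnas):
--     matriz=[]
--     for f in range(filas):
--         matriz.append([0]*columnas)
--     aux=1
--     for f in range(filas):
--         for c in range(columnas):
--             if f%2 == 0:  #Si la fila es par
--                 if c%2 == 1:   #Si la columna es impar
--                     matriz[f][c]=aux
--                     aux += 1
--             else:    #Si la fila es impar
--                 if c%2 == 0:   #Si la columna es par
--                     matriz[f][c]=aux
--                     aux += 1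
--     return matriz
-- ===== SOURCE B (Python) =====
-- def crearmatrize(filas, columnas):
--     half = columnas // 2
--     ohalf = (columnas + 1) // 2
--     matriz = []
--     for f in range(filas):
--         prior = ((f + 1) // 2) * half + (f // 2) * ohalf
--         start = 1 if f % 2 == 0 else 0
--         matriz.append([prior + 1 + (c - start) // 2 if (f + c) % 2 == 1 else 0
--                        for c in range(columnas)])
--     return matriz
-- ===== Notes on version B (the rewrite author's own statement) =====
-- stated objective: alternative
-- what changed: The running aux counter threaded through the nested loops is removed: each filled cell's value is computed independently by a closed-form count (prior-rows filled count plus within-row offset), so rows are built directly instead of mutating a zero matrix.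
import Mathlib
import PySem

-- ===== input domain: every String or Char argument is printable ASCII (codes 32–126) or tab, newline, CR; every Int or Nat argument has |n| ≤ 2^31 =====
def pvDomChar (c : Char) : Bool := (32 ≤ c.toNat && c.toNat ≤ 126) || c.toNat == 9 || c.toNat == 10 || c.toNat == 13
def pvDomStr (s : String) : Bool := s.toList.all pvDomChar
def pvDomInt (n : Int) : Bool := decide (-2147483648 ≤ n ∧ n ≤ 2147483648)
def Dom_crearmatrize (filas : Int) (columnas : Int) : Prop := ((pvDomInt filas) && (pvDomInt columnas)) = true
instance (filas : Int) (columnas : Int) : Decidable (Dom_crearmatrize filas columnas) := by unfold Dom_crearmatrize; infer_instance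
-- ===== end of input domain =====

-- B replaces A's running aux counter by a closed-form value per cell; same output, alternative decomposition.

-- ===== PORT A =====
-- matriz[f][c]=aux: f,c come from range(filas)/range(columnas), hence nonnegative and in
-- bounds, so List.set with .toNat is exact here.
def crearmatrize (filas : Int) (columnas : Int) : List (List Int) :=
  let matriz : List (List Int) :=
    (PySem.List.pyRange 0 filas 1).foldl
      (fun m _f => m ++ [PySem.List.pyRepeat [(0 : Int)] columnas]) []
  let st : List (List Int) × Int :=
    (PySem.List.pyRange 0 filas 1).foldl (fun st f =>
      (PySem.List.pyRange 0 columnas 1).foldl (fun st c =>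
        if PySem.Int.mod f 2 = 0 then          -- Si la fila es par
          if PySem.Int.mod c 2 = 1 then        -- Si la columna es impar
            (st.1.set f.toNat ((st.1.getD f.toNat []).set c.toNat st.2), st.2 + 1)
          else st
        else                                   -- Si la fila es impar
          if PySem.Int.mod c 2 = 0 then        -- Si la columna es par
            (st.1.set f.toNat ((st.1.getD f.toNat []).set c.toNat st.2), st.2 + 1)
          else st) st) (matriz, 1)
  st.1

-- ===== PORT B =====
def crearmatrize_alt (filas : Int) (columnas : Int) : List (List Int) :=
  let half := PySem.Int.floordiv columnas 2
  let ohalf := PySem.Int.floordiv (columnas + 1) 2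
  (PySem.List.pyRange 0 filas 1).map (fun f =>
    let prior := PySem.Int.floordiv (f + 1) 2 * half + PySem.Int.floordiv f 2 * ohalf
    let start : Int := if PySem.Int.mod f 2 = 0 then 1 else 0
    (PySem.List.pyRange 0 columnas 1).map (fun c =>
      if PySem.Int.mod (f + c) 2 = 1 then prior + 1 + PySem.Int.floordiv (c - start) 2
      else 0))

-- ===== PRECONDITION & SPEC =====
def Spec_crearmatrize (filas : Int) (columnas : Int) (out : List (List Int)) : Prop := out = crearmatrize_alt filas columnas
instance (filas : Int) (columnas : Int) (out : List (List Int)) : Decidable (Spec_crearmatrize filas columnas out) := by unfold Spec_crearmatrize; infer_instance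

-- ===== CLAIM (what is proved, stated in full; the proofs are below) =====
def Claim_equal_crearmatrize : Prop := ∀ (filas : Int) (columnas : Int), Dom_crearmatrize filas columnas → Spec_crearmatrize filas columnas (crearmatrize filas columnas)


-- ===== LEMMAS AND PROOFS =====

-- number of filled cells in row f among columns < c
def pvCnt (f c : Nat) : Nat := if f % 2 = 0 then c / 2 else (c + 1) / 2

-- number of filled cells in the rows before row f (C columns each)
def pvPriorSum (C : Nat) : Nat → Nat
  | 0 => 0
  | f + 1 => pvPriorSum C f + pvCnt f C

-- the finished row f as B computes it, with a = 1 + prior count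
def pvRowB (C f : Nat) (a : Int) : List Int :=
  (List.range C).map (fun c => if (f + c) % 2 = 1 then a + (pvCnt f c : Int) else 0)

-- A's inner-loop body, in Nat indices
def pvStep (f : Nat) (st : List (List Int) × Int) (c : Nat) : List (List Int) × Int :=
  if f % 2 = 0 then
    if c % 2 = 1 then (st.1.set f ((st.1.getD f []).set c st.2), st.2 + 1) else st
  else
    if c % 2 = 0 then (st.1.set f ((st.1.getD f []).set c st.2), st.2 + 1) else st

-- partially finished row f: columns < n filled
def pvRowP (C f n : Nat) (a : Int) : List Int :=
  (List.range C).map (fun c => if c < n ∧ (f + c) % 2 = 1 then a + (pvCnt f c : Int) else 0)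

-- matrix state after the first k rows are done (F rows, C columns)
def pvMatB (C F k : Nat) : List (List Int) :=
  (List.range F).map (fun f =>
    if f < k then pvRowB C f (1 + (pvPriorSum C f : Int)) else List.replicate C (0 : Int))

lemma pvCnt_zero (f : Nat) : pvCnt f 0 = 0 := by unfold pvCnt; split_ifs <;> rfl

lemma pvCnt_succ_filled (f n : Nat) (h : (f + n) % 2 = 1) : pvCnt f (n + 1) = pvCnt f n + 1 := by
  unfold pvCnt; split_ifs <;> omega

lemma pvCnt_succ_unfilled (f n : Nat) (h : (f + n) % 2 ≠ 1) : pvCnt f (n + 1) = pvCnt f n := by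
  unfold pvCnt; split_ifs <;> omega

lemma pvRowP_zero (C f : Nat) (a : Int) : pvRowP C f 0 a = List.replicate C (0 : Int) := by
  unfold pvRowP
  apply List.ext_getElem <;> simp

lemma pvRowP_full (C f : Nat) (a : Int) : pvRowP C f C a = pvRowB C f a := by
  unfold pvRowP pvRowB
  apply List.map_congr_left
  intro c hc
  have := List.mem_range.mp hc
  simp [this]

lemma pvRowP_set (C f n : Nat) (a : Int) (_hn : n < C) (h : (f + n) % 2 = 1) :
    (pvRowP C f n a).set n (a + (pvCnt f n : Int)) = pvRowP C f (n + 1) a := by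
  unfold pvRowP
  apply List.ext_getElem
  · simp
  · intro i h1 h2
    simp only [List.getElem_set, List.getElem_map, List.getElem_range]
    by_cases hi : n = i
    · subst hi; simp [h]
    · simp only [hi, if_false]
      by_cases hp : (f + i) % 2 = 1 <;> by_cases hlt : i < n <;>
        simp_all <;> omega

lemma pvRowP_frozen (C f n : Nat) (a : Int) (h : (f + n) % 2 ≠ 1) :
    pvRowP C f n a = pvRowP C f (n + 1) a := by
  unfold pvRowP
  apply List.map_congr_left
  intro c _
  by_cases hp : (f + c) % 2 = 1 <;> by_cases hlt : c < n <;>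
    by_cases hlt' : c < n + 1 <;> simp_all <;> omega

lemma pvSetGetD_self (m : List (List Int)) (f : Nat) (hf : f < m.length) :
    m.set f (m.getD f []) = m := by
  apply List.ext_getElem
  · simp
  intro i h1 h2
  simp only [List.getElem_set]
  by_cases hi : f = i
  · subst hi; simp [List.getD_eq_getElem?_getD, List.getElem?_eq_getElem hf]
  · simp [hi]

lemma pvGetD_set_self (m : List (List Int)) (f : Nat) (r : List Int) (hf : f < m.length) :
    (m.set f r).getD f [] = r := by
  simp [List.getD_eq_getElem?_getD, hf]

lemma pvInner_spec (f : Nat) (m : List (List Int)) (a : Int) (C0 : Nat)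
    (hf : f < m.length) (hrow : m.getD f [] = List.replicate C0 (0 : Int)) :
    ∀ n, n ≤ C0 →
      (List.range n).foldl (pvStep f) (m, a) =
        (m.set f (pvRowP C0 f n a), a + (pvCnt f n : Int)) := by
  intro n
  induction n with
  | zero =>
    intro _
    rw [pvRowP_zero, ← hrow, pvCnt_zero, pvSetGetD_self m f hf]
    simp
  | succ n ih =>
    intro h
    rw [List.range_succ, List.foldl_append, ih (by omega), List.foldl_cons, List.foldl_nil]
    have hget : ((m.set f (pvRowP C0 f n a)).getD f []) = pvRowP C0 f n a :=
      pvGetD_set_self m f _ hf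
    unfold pvStep
    by_cases hfp : f % 2 = 0
    · by_cases hcp : n % 2 = 1
      · have hfill : (f + n) % 2 = 1 := by omega
        simp only [hfp, hcp, if_true, hget, List.set_set]
        rw [pvRowP_set C0 f n a (by omega) hfill, pvCnt_succ_filled f n hfill]
        push_cast; ring_nf
      · have hfill : (f + n) % 2 ≠ 1 := by omega
        simp only [hfp, hcp, if_true, if_false]
        rw [pvRowP_frozen C0 f n a hfill, pvCnt_succ_unfilled f n hfill]
    · by_cases hcp : n % 2 = 0
      · have hfill : (f + n) % 2 = 1 := by omega
        simp only [hfp, hcp, if_true, if_false, hget, List.set_set]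
        rw [pvRowP_set C0 f n a (by omega) hfill, pvCnt_succ_filled f n hfill]
        push_cast; ring_nf
      · have hfill : (f + n) % 2 ≠ 1 := by omega
        simp only [hfp, hcp, if_false]
        rw [pvRowP_frozen C0 f n a hfill, pvCnt_succ_unfilled f n hfill]

lemma pvMatB_zero (C F : Nat) : pvMatB C F 0 = List.replicate F (List.replicate C (0 : Int)) := by
  unfold pvMatB
  apply List.ext_getElem <;> simp

lemma pvMatB_getD (C F k : Nat) (hk : k < F) :
    (pvMatB C F k).getD k [] = List.replicate C (0 : Int) := by
  unfold pvMatB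
  simp [List.getD_eq_getElem?_getD, hk]

lemma pvMatB_set (C F k : Nat) (_hk : k < F) :
    (pvMatB C F k).set k (pvRowB C k (1 + (pvPriorSum C k : Int))) = pvMatB C F (k + 1) := by
  unfold pvMatB
  apply List.ext_getElem
  · simp
  · intro i h1 h2
    simp only [List.getElem_set, List.getElem_map, List.getElem_range]
    by_cases hi : k = i
    · subst hi; simp
    · simp only [hi, if_false]
      have hiff : (i < k) = (i < k + 1) := by apply propext; omega
      simp only [hiff]

lemma pvOuter_spec (C0 F : Nat) :
    ∀ k, k ≤ F →
      (List.range k).foldl (fun st f => (List.range C0).foldl (pvStep f) st)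
        (List.replicate F (List.replicate C0 (0 : Int)), 1) =
        (pvMatB C0 F k, 1 + (pvPriorSum C0 k : Int)) := by
  intro k
  induction k with
  | zero =>
    intro _
    simp [pvMatB_zero, pvPriorSum]
  | succ k ih =>
    intro h
    rw [List.range_succ, List.foldl_append, ih (by omega), List.foldl_cons, List.foldl_nil]
    have hk : k < F := by omega
    have hlen : k < (pvMatB C0 F k).length := by unfold pvMatB; simpa using hk
    rw [pvInner_spec k (pvMatB C0 F k) (1 + (pvPriorSum C0 k : Int)) C0 hlen
      (pvMatB_getD C0 F k hk) C0 le_rfl]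
    rw [pvRowP_full, pvMatB_set C0 F k hk]
    have : pvPriorSum C0 (k + 1) = pvPriorSum C0 k + pvCnt k C0 := rfl
    rw [this]
    push_cast; ring_nf

-- the zero-matrix building loop
lemma pvFoldl_append_const {α β : Type} (l : List α) (z : β) (init : List β) :
    l.foldl (fun m _ => m ++ [z]) init = init ++ List.replicate l.length z := by
  induction l generalizing init with
  | nil => simp
  | cons x xs ih => simp [ih, List.replicate_succ]

lemma pvModC0 (k : Nat) : (PySem.Int.mod ((k : Nat) : Int) 2 = 0) = (k % 2 = 0) := by
  rw [PySem.Int.mod_eq_emod_of_pos (by norm_num)]; apply propext; omega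

lemma pvModC1 (k : Nat) : (PySem.Int.mod ((k : Nat) : Int) 2 = 1) = (k % 2 = 1) := by
  rw [PySem.Int.mod_eq_emod_of_pos (by norm_num)]; apply propext; omega

lemma pvStep_fold (f : Nat) (st : List (List Int) × Int) (c : Nat) :
    (if f % 2 = 0 then
       if c % 2 = 1 then (st.1.set f ((st.1.getD f []).set c st.2), st.2 + 1) else st
     else if c % 2 = 0 then (st.1.set f ((st.1.getD f []).set c st.2), st.2 + 1) else st)
    = pvStep f st c := rfl

lemma pvA_eq (filas columnas : Int) :
    crearmatrize filas columnas = pvMatB columnas.toNat filas.toNat filas.toNat := by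
  simp only [crearmatrize, PySem.List.pyRange_one, Int.sub_zero, zero_add, List.foldl_map,
    PySem.List.pyRepeat_singleton, Int.toNat_natCast, pvModC0, pvModC1, pvStep_fold]
  rw [pvFoldl_append_const]
  simp only [List.nil_append, List.length_range]
  rw [pvOuter_spec columnas.toNat filas.toNat filas.toNat le_rfl]

lemma pvPriorSum_closed (C k : Nat) :
    pvPriorSum C k = ((k + 1) / 2) * (C / 2) + (k / 2) * ((C + 1) / 2) := by
  induction k with
  | zero => simp [pvPriorSum]
  | succ k ih =>
    have hstep : pvPriorSum C (k + 1) = pvPriorSum C k + pvCnt k C := rfl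
    rw [hstep, ih]
    unfold pvCnt
    rcases Nat.even_or_odd k with ⟨m, hm⟩ | ⟨m, hm⟩
    · subst hm
      have h1 : (m + m + 1) / 2 = m := by omega
      have h2 : (m + m) / 2 = m := by omega
      have h3 : (m + m + 1 + 1) / 2 = m + 1 := by omega
      have h4 : (m + m) % 2 = 0 := by omega
      simp only [h1, h2, h3, h4, if_true]
      ring
    · subst hm
      have h1 : (2 * m + 1 + 1) / 2 = m + 1 := by omega
      have h2 : (2 * m + 1) / 2 = m := by omega
      have h3 : (2 * m + 1 + 1 + 1) / 2 = m + 1 := by omega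
      have h4 : ¬ (2 * m + 1) % 2 = 0 := by omega
      simp only [h1, h2, h3, h4, if_false]
      ring

lemma pvMatB_full (C F : Nat) :
    pvMatB C F F = (List.range F).map (fun f => pvRowB C f (1 + (pvPriorSum C f : Int))) := by
  unfold pvMatB
  apply List.map_congr_left
  intro f hf
  simp [List.mem_range.mp hf]

lemma pvFloordiv_nat (m : Nat) : PySem.Int.floordiv ((m : Nat) : Int) 2 = ((m / 2 : Nat) : Int) := by
  exact_mod_cast PySem.Int.floordiv_natCast m 2

lemma pvB_eq (filas columnas : Int) :
    crearmatrize_alt filas columnas = pvMatB columnas.toNat filas.toNat filas.toNat := by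
  rw [pvMatB_full]
  simp only [crearmatrize_alt, PySem.List.pyRange_one, Int.sub_zero, zero_add, List.map_map]
  apply List.map_congr_left
  intro k hk
  simp only [Function.comp_apply]
  unfold pvRowB
  apply List.map_congr_left
  intro c hc
  have hcC : c < columnas.toNat := List.mem_range.mp hc
  have hcol : (0 : Int) < columnas := by omega
  have hcoleq : columnas = ((columnas.toNat : Nat) : Int) := by omega
  simp only [Function.comp_apply]
  have hmod : (PySem.Int.mod ((k : Int) + (c : Int)) 2 = 1) = ((k + c) % 2 = 1) := by
    rw [PySem.Int.mod_eq_emod_of_pos (by norm_num)]; apply propext; omega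
  simp only [hmod]
  by_cases hpar : (k + c) % 2 = 1
  · simp only [hpar, if_true]
    set C := columnas.toNat with hC
    have hdC : PySem.Int.floordiv columnas 2 = ((C / 2 : Nat) : Int) := by
      rw [hcoleq]; exact pvFloordiv_nat C
    have hdC1 : PySem.Int.floordiv (columnas + 1) 2 = (((C + 1) / 2 : Nat) : Int) := by
      rw [hcoleq, show ((C : Int) + 1) = (((C + 1 : Nat) : Nat) : Int) by push_cast; ring]
      exact pvFloordiv_nat (C + 1)
    have hdk : PySem.Int.floordiv (k : Int) 2 = ((k / 2 : Nat) : Int) := pvFloordiv_nat k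
    have hdk1 : PySem.Int.floordiv ((k : Int) + 1) 2 = (((k + 1) / 2 : Nat) : Int) := by
      rw [show ((k : Int) + 1) = (((k + 1 : Nat) : Nat) : Int) by push_cast; ring]
      exact pvFloordiv_nat (k + 1)
    rw [hdC, hdC1, hdk, hdk1, pvPriorSum_closed]
    simp only [pvModC0]
    by_cases hkp : k % 2 = 0
    · have hcodd : c % 2 = 1 := by omega
      have hc1 : 1 ≤ c := by omega
      have hsub : ((c : Int) - 1) = (((c - 1 : Nat) : Nat) : Int) := by omega
      simp only [hkp, if_true, hsub, pvFloordiv_nat (c - 1)]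
      have hcnt : pvCnt k c = (c - 1) / 2 := by unfold pvCnt; simp [hkp]; omega
      rw [hcnt]
      push_cast
      ring
    · have hceven : c % 2 = 0 := by omega
      simp only [hkp, if_false, Int.sub_zero, pvFloordiv_nat c]
      have hcnt : pvCnt k c = c / 2 := by unfold pvCnt; simp [hkp]; omega
      rw [hcnt]
      push_cast
      ring
  · simp [hpar]

-- ===== VERDICT (by name: the statement is the Claim_ definition above) =====
theorem crearmatrize_spec : Claim_equal_crearmatrize := by
  intro filas columnas _
  unfold Spec_crearmatrize
  rw [pvA_eq, pvB_eq]
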